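-- pv_equiv track=rewrite | github.com/HassanSalah120/Best-Practices-Doctor | backend/rules/php/circular_dependency.py | _fqcn_by_basename
-- ===== SOURCE A (Python) =====
-- def _fqcn_by_basename(classes_by_fqcn: dict[str, object]) -> dict[str, str]:
--     out: dict[str, str] = {}
--     seen_multi: set[str] = set()
--     for fqcn in classes_by_fqcn.keys():
--         base = fqcn.split("\\")[-1]
--         if base in seen_multi:
--             continue
--         if base in out:
--             out.pop(base, None)
--             seen_multi.add(base)
--             continue
--         out[base] = fqcn
--     return out
-- ===== SOURCE B (Python) =====
-- def _fqcn_by_basename(classes_by_fqcn: dict[str, object]) -> dict[str, str]: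
--     counts: dict[str, int] = {}
--     for fqcn in classes_by_fqcn.keys():
--         base = fqcn.split("\\")[-1]
--         counts[base] = counts.get(base, 0) + 1
--     out: dict[str, str] = {}
--     for fqcn in classes_by_fqcn.keys():
--         base = fqcn.split("\\")[-1]
--         if counts[base] == 1:
--             out[base] = fqcn
--     return out
-- ===== Notes on version B (the rewrite author's own statement) =====
-- stated objective: alternative
-- what changed: Replaces A's single-pass insert/pop/seen_multi bookkeeping with a two-pass count-then-select: first pass counts each basename, second pass keeps exactly the fqcns whose basename occurs once.
import Mathlib
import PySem

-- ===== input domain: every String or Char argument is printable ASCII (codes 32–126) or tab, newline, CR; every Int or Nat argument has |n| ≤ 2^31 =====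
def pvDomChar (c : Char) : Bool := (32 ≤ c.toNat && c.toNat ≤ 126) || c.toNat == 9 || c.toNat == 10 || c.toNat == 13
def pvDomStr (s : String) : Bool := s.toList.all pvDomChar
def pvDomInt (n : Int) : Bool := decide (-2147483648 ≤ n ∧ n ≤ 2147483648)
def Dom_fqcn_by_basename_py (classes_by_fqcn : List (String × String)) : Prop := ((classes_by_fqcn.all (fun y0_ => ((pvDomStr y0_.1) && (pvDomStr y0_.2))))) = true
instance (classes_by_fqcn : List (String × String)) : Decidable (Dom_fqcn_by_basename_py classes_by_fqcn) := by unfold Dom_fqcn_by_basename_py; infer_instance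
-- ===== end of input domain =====

-- B replaces A's single-pass insert/pop/seen_multi bookkeeping with a two-pass
-- count-then-select over the same keys (alternative decomposition, same cost).

-- shared helper: fqcn.split("\\")[-1] (both Pythons compute exactly this expression)
def pvBase (f : String) : String :=
  (PySem.List.pyGet? ((PySem.Str.split? f "\\").getD []) (-1)).getD ""

-- ===== PORT A =====
-- the assoc-list argument stands for a Python dict: its keys() are the first
-- components with the first occurrence kept (PySem.List.dedup), in order.
def fqcn_by_basename_py (classes_by_fqcn : List (String × String)) : List (String × String) :=
  let keys := PySem.List.dedup (classes_by_fqcn.map (·.1))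
  let st := keys.foldl
    (fun (st : PySem.Dict String String × PySem.Set String) fqcn =>
      let base := pvBase fqcn
      if PySem.Set.contains st.2 base then st
      else if st.1.contains base then (st.1.erase base, PySem.Set.add st.2 base)
      else (st.1.insert base fqcn, st.2))
    (PySem.Dict.empty, PySem.Set.empty)
  st.1.items

-- ===== PORT B =====
def fqcn_by_basename_py_alt (classes_by_fqcn : List (String × String)) : List (String × String) :=
  let keys := PySem.List.dedup (classes_by_fqcn.map (·.1))
  let counts := keys.foldl
    (fun (d : PySem.Dict String Int) fqcn => d.insert (pvBase fqcn) (d.getD (pvBase fqcn) 0 + 1))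
    PySem.Dict.empty
  let out := keys.foldl
    (fun (d : PySem.Dict String String) fqcn =>
      -- counts[base] never raises: base was counted in the first pass, so getD 0 is exact
      if counts.getD (pvBase fqcn) 0 == 1 then d.insert (pvBase fqcn) fqcn else d)
    PySem.Dict.empty
  out.items

-- ===== PRECONDITION & SPEC =====
def Spec_fqcn_by_basename_py (classes_by_fqcn : List (String × String)) (out : List (String × String)) : Prop := out = fqcn_by_basename_py_alt classes_by_fqcn
instance (classes_by_fqcn : List (String × String)) (out : List (String × String)) : Decidable (Spec_fqcn_by_basename_py classes_by_fqcn out) := by unfold Spec_fqcn_by_basename_py; infer_instance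

-- ===== CLAIM (what is proved, stated in full; the proofs are below) =====
def Claim_equal_fqcn_by_basename_py : Prop := ∀ (classes_by_fqcn : List (String × String)), Dom_fqcn_by_basename_py classes_by_fqcn → Spec_fqcn_by_basename_py classes_by_fqcn (fqcn_by_basename_py classes_by_fqcn)

-- ===== LEMMAS AND PROOFS =====

-- the common value both ports compute: the fqcns whose basename occurs exactly
-- once among the keys, keyed by basename, in key order
def pvOut (l : List String) : List (String × String) :=
  (l.filter (fun f => (l.map pvBase).count (pvBase f) == 1)).map (fun f => (pvBase f, f))

theorem count_append_single (q : List String) (f : String) (b : String) :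
    (((q ++ [f]).map pvBase).count b) = ((q.map pvBase).count b) + (if pvBase f = b then 1 else 0) := by
  simp [List.count_append, List.count_singleton, beq_iff_eq]

theorem filter_congr_pred (q : List String) (f : String) :
    List.filter (fun g => ((q ++ [f]).map pvBase).count (pvBase g) == 1) q
      = List.filter (fun g => if pvBase f = pvBase g
          then ((q.map pvBase).count (pvBase g) + 1 == 1)
          else ((q.map pvBase).count (pvBase g) == 1)) q := by
  apply List.filter_congr
  intro g _
  rw [count_append_single]
  by_cases he : pvBase f = pvBase g <;> simp [he]

theorem pvOut_append_two (q : List String) (f : String)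
    (h : 2 ≤ (q.map pvBase).count (pvBase f)) : pvOut (q ++ [f]) = pvOut q := by
  unfold pvOut
  rw [List.filter_append]
  have h2 : List.filter (fun g => ((q ++ [f]).map pvBase).count (pvBase g) == 1) [f] = [] := by
    simp only [List.filter_cons, List.filter_nil]
    rw [count_append_single]
    simp
    omega
  rw [h2, List.append_nil, filter_congr_pred]
  congr 1
  apply List.filter_congr
  intro g _
  by_cases he : pvBase f = pvBase g
  · rw [he] at h
    simp [he]; omega
  · simp [he]

theorem pvOut_append_zero (q : List String) (f : String)
    (h : (q.map pvBase).count (pvBase f) = 0) :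
    pvOut (q ++ [f]) = pvOut q ++ [(pvBase f, f)] := by
  have hne : ∀ g ∈ q, pvBase f ≠ pvBase g := by
    intro g hg he
    have : pvBase g ∈ q.map pvBase := List.mem_map_of_mem hg
    rw [← he] at this
    exact absurd (List.count_pos_iff.mpr this) (by omega)
  unfold pvOut
  rw [List.filter_append, List.map_append]
  congr 1
  · congr 1
    apply List.filter_congr
    intro g hg
    rw [count_append_single]
    simp [if_neg (hne g hg)]
  · simp only [List.filter_cons, List.filter_nil]
    rw [count_append_single]
    simp [h]

theorem pvOut_append_one (q : List String) (f : String)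
    (h : (q.map pvBase).count (pvBase f) = 1) :
    pvOut (q ++ [f]) = (pvOut q).filter (fun p => !(p.1 == pvBase f)) := by
  unfold pvOut
  rw [List.filter_append]
  have h2 : List.filter (fun g => ((q ++ [f]).map pvBase).count (pvBase g) == 1) [f] = [] := by
    simp only [List.filter_cons, List.filter_nil]
    rw [count_append_single]
    simp [h]
  rw [h2, List.append_nil]
  simp only [List.filter_map]
  rw [List.filter_filter]
  congr 1
  rw [filter_congr_pred]
  apply List.filter_congr
  intro g _
  by_cases he : pvBase f = pvBase g
  · rw [he] at h
    simp [he, Function.comp, h]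
  · simp [he, Function.comp, Ne.symm he]

theorem pvOut_keys_nodup (l : List String) :
    ((l.filter (fun f => (l.map pvBase).count (pvBase f) == 1)).map pvBase).Nodup := by
  rw [List.nodup_iff_count_le_one]
  intro b
  by_cases hb : b ∈ (l.filter (fun f => (l.map pvBase).count (pvBase f) == 1)).map pvBase
  · obtain ⟨f, hf, rfl⟩ := List.mem_map.mp hb
    have hf2 := (List.mem_filter.mp hf).2
    have h1 : (l.map pvBase).count (pvBase f) = 1 := by simpa using hf2
    have hsub : ((l.filter (fun f => (l.map pvBase).count (pvBase f) == 1)).map pvBase).Sublist (l.map pvBase) :=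
      List.Sublist.map pvBase List.filter_sublist
    calc _ ≤ (l.map pvBase).count (pvBase f) := hsub.count_le _
      _ = 1 := h1
  · simp [List.count_eq_zero_of_not_mem hb]

theorem portB_eq_pvOut (l : List (String × String)) :
    fqcn_by_basename_py_alt l = pvOut (PySem.List.dedup (l.map (·.1))) := by
  unfold fqcn_by_basename_py_alt
  set keys := PySem.List.dedup (l.map (·.1)) with hk
  simp only []
  have hc : ∀ b, (keys.foldl
      (fun (d : PySem.Dict String Int) fqcn => d.insert (pvBase fqcn) (d.getD (pvBase fqcn) 0 + 1))
      PySem.Dict.empty).getD b 0 = ((keys.map pvBase).count b : Int) := by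
    intro b
    have h := PySem.Dict.getD_foldl_insert_add_one (keys.map pvBase) PySem.Dict.empty b
    rw [List.foldl_map] at h
    simpa using h
  rw [PySem.List.foldl_if_eq_foldl_filter]
  have hfil : keys.filter (fun fqcn => (keys.foldl
      (fun (d : PySem.Dict String Int) fqcn => d.insert (pvBase fqcn) (d.getD (pvBase fqcn) 0 + 1))
      PySem.Dict.empty).getD (pvBase fqcn) 0 == 1)
      = keys.filter (fun fqcn => (keys.map pvBase).count (pvBase fqcn) == 1) := by
    apply List.filter_congr
    intro g _
    rw [hc]
    apply Bool.eq_iff_iff.mpr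
    simp
  rw [hfil, PySem.Dict.items_foldl_insert_fresh _ _ _ _
    (fun a _ => PySem.Dict.contains_empty _) (pvOut_keys_nodup keys)]
  simp [pvOut, PySem.Dict.empty]

theorem loopA_inv (l : List String) : ∀ (q : List String)
    (out : PySem.Dict String String) (seen : PySem.Set String),
    out.items = pvOut q →
    (∀ b, b ∈ seen ↔ 2 ≤ (q.map pvBase).count b) →
    (l.foldl
      (fun (st : PySem.Dict String String × PySem.Set String) fqcn =>
        let base := pvBase fqcn
        if PySem.Set.contains st.2 base then st
        else if st.1.contains base then (st.1.erase base, PySem.Set.add st.2 base)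
        else (st.1.insert base fqcn, st.2))
      (out, seen)).1.items = pvOut (q ++ l) := by
  induction l with
  | nil => intro q out seen hout _; simpa using hout
  | cons f t ih =>
    intro q out seen hout hseen
    rw [List.foldl_cons, show q ++ f :: t = (q ++ [f]) ++ t by simp]
    have hkey : ∀ b, out.contains b
        = ((q.filter (fun g => (q.map pvBase).count (pvBase g) == 1)).any (fun g => pvBase g == b)) := by
      intro b
      simp [PySem.Dict.contains, hout, pvOut, List.any_map, Function.comp]
    by_cases h2 : 2 ≤ (q.map pvBase).count (pvBase f)
    · have hc : PySem.Set.contains seen (pvBase f) = true := by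
        simpa [PySem.Set.contains] using (hseen _).mpr h2
      simp only [hc, if_true]
      apply ih
      · rw [hout, pvOut_append_two q f h2]
      · intro b
        rw [count_append_single, hseen]
        by_cases he : pvBase f = b
        · subst he; constructor <;> intro <;> omega
        · simp [he]
    · have hmem : pvBase f ∉ seen := fun hm => h2 ((hseen _).mp hm)
      have hc : PySem.Set.contains seen (pvBase f) = false := by
        simpa [PySem.Set.contains] using hmem
      by_cases h1 : (q.map pvBase).count (pvBase f) = 1
      · have hco : out.contains (pvBase f) = true := by
          rw [hkey]
          have hpos : 0 < List.count (pvBase f) (List.map pvBase q) := by omega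
          obtain ⟨g, hg, hgb⟩ := List.mem_map.mp (List.count_pos_iff.mp hpos)
          exact List.any_eq_true.mpr ⟨g, List.mem_filter.mpr ⟨hg, by simp [hgb, h1]⟩, by simp [hgb]⟩
        simp only [hc, hco, if_true, Bool.false_eq_true, if_false]
        apply ih
        · simp only [PySem.Dict.erase]
          rw [hout, pvOut_append_one q f h1]
        · intro b
          rw [count_append_single, PySem.Set.mem_add]
          by_cases he : pvBase f = b
          · subst he; simp [h1]
          · simp [he, Ne.symm he, hseen]
      · have hn0 : (q.map pvBase).count (pvBase f) = 0 := by omega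
        have hne : ∀ g ∈ q, pvBase g ≠ pvBase f := by
          intro g hg he
          have : pvBase f ∈ q.map pvBase := he ▸ List.mem_map_of_mem hg
          exact absurd (List.count_pos_iff.mpr this) (by omega)
        have hco : out.contains (pvBase f) = false := by
          rw [hkey]
          simp only [List.any_eq_false]
          intro g hg
          simp [hne g (List.mem_filter.mp hg).1]
        simp only [hc, hco, Bool.false_eq_true, if_false]
        apply ih
        · rw [PySem.Dict.items_insert_of_not_contains _ _ hco, hout, pvOut_append_zero q f hn0]
        · intro b
          rw [count_append_single, hseen]
          by_cases he : pvBase f = b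
          · subst he; simp [hn0]
          · simp [he]

theorem portA_eq_pvOut (l : List (String × String)) :
    fqcn_by_basename_py l = pvOut (PySem.List.dedup (l.map (·.1))) := by
  unfold fqcn_by_basename_py
  have h := loopA_inv (PySem.List.dedup (l.map (·.1))) [] PySem.Dict.empty PySem.Set.empty
    (by simp [pvOut, PySem.Dict.empty]) (by intro b; simp [PySem.Set.empty])
  simpa using h

-- ===== VERDICT (by name: the statement is the Claim_ definition above) =====
theorem fqcn_by_basename_py_spec : Claim_equal_fqcn_by_basename_py := by
  intro l _
  unfold Spec_fqcn_by_basename_py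
  rw [portA_eq_pvOut, portB_eq_pvOut]
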